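-- pv_equiv track=rewrite | github.com/snakemake-workflows/transcriptome-differential-expression | workflow/scripts/create_splice_bed.py | bed_from_cigar
-- ===== SOURCE A (Python) =====
-- def bed_from_cigar(
--     alignstart,
--     is_reverse,
--     cigartuples,
--     readname,
--     referencename,
--     qualscore,
--     juncDirection,
-- ):
--     positiveTxn = "27,158,119"
--     negativeTxn = "217,95,2"
--     unknownTxn = "99,99,99"
--     refpos = alignstart
--     intronblocks = []
--     hasmatch = False
--
--     for block in cigartuples:
--         if block[0] == 3 and hasmatch:
--             intronblocks.append([refpos, refpos + block[1]])
--             refpos += block[1]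
--         elif block[0] in {0, 7, 8, 2}:
--             refpos += block[1]
--             if block[0] in {0, 7, 8}:
--                 hasmatch = True
--
--     esizes, estarts = [], [0]
--     for i in intronblocks:
--         esizes.append(i[0] - (alignstart + estarts[-1]))
--         estarts.append(i[1] - alignstart)
--     esizes.append(refpos - (alignstart + estarts[-1]))
--
--     rgbcolor = {"+": positiveTxn, "-": negativeTxn, "ambig": unknownTxn}.get(
--         juncDirection, unknownTxn
--     )
--
--     return [
--         referencename,
--         str(alignstart),
--         str(refpos),
--         readname,
--         str(qualscore),
--         juncDirection,
--         str(alignstart),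
--         str(refpos),
--         rgbcolor,
--         str(len(intronblocks) + 1),
--         ",".join([str(x) for x in esizes]) + ",",
--         ",".join([str(x) for x in estarts]) + ",",
--     ]
-- ===== SOURCE B (Python) =====
-- def bed_from_cigar(
--     alignstart,
--     is_reverse,
--     cigartuples,
--     readname,
--     referencename,
--     qualscore,
--     juncDirection,
-- ):
--     # single pass: build esizes/estarts directly, no intermediate intronblocks list
--     refpos = alignstart
--     hasmatch = False
--     nintrons = 0
--     esizes = []
--     estarts = [0]
--     for op, ln in cigartuples:
--         if op == 3 and hasmatch:
--             esizes.append(refpos - (alignstart + estarts[-1]))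
--             refpos += ln
--             estarts.append(refpos - alignstart)
--             nintrons += 1
--         elif op in (0, 7, 8, 2):
--             refpos += ln
--             if op != 2:
--                 hasmatch = True
--     esizes.append(refpos - (alignstart + estarts[-1]))
--
--     if juncDirection == "+":
--         rgbcolor = "27,158,119"
--     elif juncDirection == "-":
--         rgbcolor = "217,95,2"
--     else:
--         rgbcolor = "99,99,99"
--
--     return [
--         referencename,
--         str(alignstart),
--         str(refpos),
--         readname,
--         str(qualscore),
--         juncDirection,
--         str(alignstart),
--         str(refpos),
--         rgbcolor,
--         str(nintrons + 1),
--         ",".join(str(x) for x in esizes) + ",",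
--         ",".join(str(x) for x in estarts) + ",",
--     ]
-- ===== Notes on version B (the rewrite author's own statement) =====
-- stated objective: simpler
-- what changed: B fuses A's two loops into a single pass that builds esizes/estarts and the intron count directly, never materialising the intermediate intronblocks list, and replaces the throwaway colour dict with a plain if/elif chain.
import Mathlib
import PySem

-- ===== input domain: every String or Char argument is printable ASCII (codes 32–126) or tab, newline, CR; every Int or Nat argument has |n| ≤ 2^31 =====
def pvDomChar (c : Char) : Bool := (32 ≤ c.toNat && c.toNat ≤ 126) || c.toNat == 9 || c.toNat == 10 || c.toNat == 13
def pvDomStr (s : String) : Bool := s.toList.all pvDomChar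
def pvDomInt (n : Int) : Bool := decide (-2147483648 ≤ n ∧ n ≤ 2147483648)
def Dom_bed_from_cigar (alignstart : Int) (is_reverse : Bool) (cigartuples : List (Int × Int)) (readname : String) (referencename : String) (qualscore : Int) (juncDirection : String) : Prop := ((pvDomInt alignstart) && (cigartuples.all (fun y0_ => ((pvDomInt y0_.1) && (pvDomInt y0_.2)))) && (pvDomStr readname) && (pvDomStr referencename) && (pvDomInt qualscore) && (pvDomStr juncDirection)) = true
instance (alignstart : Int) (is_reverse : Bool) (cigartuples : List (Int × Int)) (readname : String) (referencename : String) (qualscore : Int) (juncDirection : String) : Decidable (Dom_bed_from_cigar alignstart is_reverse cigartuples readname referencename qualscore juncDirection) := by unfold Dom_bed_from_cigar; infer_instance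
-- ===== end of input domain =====

-- B builds esizes/estarts in one fused pass without the intermediate intronblocks list (simpler decomposition; same output).

-- ===== PORT A =====
-- first loop of A: state (refpos, intronblocks, hasmatch)
def pvStepA (st : Int × List (Int × Int) × Bool) (block : Int × Int) : Int × List (Int × Int) × Bool :=
  if block.1 == 3 && st.2.2 then
    (st.1 + block.2, st.2.1 ++ [(st.1, st.1 + block.2)], st.2.2)
  else if block.1 == 0 || block.1 == 7 || block.1 == 8 || block.1 == 2 then
    (st.1 + block.2, st.2.1,
     if block.1 == 0 || block.1 == 7 || block.1 == 8 then true else st.2.2)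
  else st

-- second loop of A: state (esizes, estarts); estarts[-1] is Python's negative index
def pvExonStep (alignstart : Int) (p : List Int × List Int) (i : Int × Int) : List Int × List Int :=
  (p.1 ++ [i.1 - (alignstart + PySem.List.pyGetD p.2 (-1) 0)], p.2 ++ [i.2 - alignstart])

def bed_from_cigar (alignstart : Int) (is_reverse : Bool) (cigartuples : List (Int × Int)) (readname : String) (referencename : String) (qualscore : Int) (juncDirection : String) : List String :=
  let st := cigartuples.foldl pvStepA (alignstart, [], false)
  let refpos := st.1
  let intronblocks := st.2.1
  let es := intronblocks.foldl (pvExonStep alignstart) ([], [0])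
  let esizes := es.1 ++ [refpos - (alignstart + PySem.List.pyGetD es.2 (-1) 0)]
  let estarts := es.2
  let rgbcolor := (((PySem.Dict.empty.insert "+" "27,158,119").insert "-" "217,95,2").insert "ambig" "99,99,99").getD juncDirection "99,99,99"
  [referencename, PySem.Int.toStr alignstart, PySem.Int.toStr refpos, readname,
   PySem.Int.toStr qualscore, juncDirection, PySem.Int.toStr alignstart, PySem.Int.toStr refpos,
   rgbcolor, PySem.Int.toStr ((intronblocks.length : Int) + 1),
   PySem.Str.join "," (esizes.map PySem.Int.toStr) ++ ",",
   PySem.Str.join "," (estarts.map PySem.Int.toStr) ++ ","]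

-- ===== PORT B =====
-- single fused pass: state (refpos, hasmatch, nintrons, esizes, estarts)
def pvStepB (alignstart : Int) (st : Int × Bool × Int × List Int × List Int) (b : Int × Int) : Int × Bool × Int × List Int × List Int :=
  if b.1 == 3 && st.2.1 then
    (st.1 + b.2, st.2.1, st.2.2.1 + 1,
     st.2.2.2.1 ++ [st.1 - (alignstart + PySem.List.pyGetD st.2.2.2.2 (-1) 0)],
     st.2.2.2.2 ++ [st.1 + b.2 - alignstart])
  else if b.1 == 0 || b.1 == 7 || b.1 == 8 || b.1 == 2 then
    (st.1 + b.2, (if b.1 != 2 then true else st.2.1), st.2.2.1, st.2.2.2.1, st.2.2.2.2)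
  else st

def bed_from_cigar_alt (alignstart : Int) (is_reverse : Bool) (cigartuples : List (Int × Int)) (readname : String) (referencename : String) (qualscore : Int) (juncDirection : String) : List String :=
  let st := cigartuples.foldl (pvStepB alignstart) (alignstart, false, 0, [], [0])
  let refpos := st.1
  let nintrons := st.2.2.1
  let esizes := st.2.2.2.1 ++ [refpos - (alignstart + PySem.List.pyGetD st.2.2.2.2 (-1) 0)]
  let estarts := st.2.2.2.2
  let rgbcolor := if juncDirection == "+" then "27,158,119"
                  else if juncDirection == "-" then "217,95,2"
                  else "99,99,99"
  [referencename, PySem.Int.toStr alignstart, PySem.Int.toStr refpos, readname,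
   PySem.Int.toStr qualscore, juncDirection, PySem.Int.toStr alignstart, PySem.Int.toStr refpos,
   rgbcolor, PySem.Int.toStr (nintrons + 1),
   PySem.Str.join "," (esizes.map PySem.Int.toStr) ++ ",",
   PySem.Str.join "," (estarts.map PySem.Int.toStr) ++ ","]

-- ===== PRECONDITION & SPEC =====
def Spec_bed_from_cigar (alignstart : Int) (is_reverse : Bool) (cigartuples : List (Int × Int)) (readname : String) (referencename : String) (qualscore : Int) (juncDirection : String) (out : List String) : Prop := out = bed_from_cigar_alt alignstart is_reverse cigartuples readname referencename qualscore juncDirection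
instance (alignstart : Int) (is_reverse : Bool) (cigartuples : List (Int × Int)) (readname : String) (referencename : String) (qualscore : Int) (juncDirection : String) (out : List String) : Decidable (Spec_bed_from_cigar alignstart is_reverse cigartuples readname referencename qualscore juncDirection out) := by unfold Spec_bed_from_cigar; infer_instance

-- ===== CLAIM (what is proved, stated in full; the proofs are below) =====
def Claim_equal_bed_from_cigar : Prop := ∀ (alignstart : Int) (is_reverse : Bool) (cigartuples : List (Int × Int)) (readname : String) (referencename : String) (qualscore : Int) (juncDirection : String), Dom_bed_from_cigar alignstart is_reverse cigartuples readname referencename qualscore juncDirection → Spec_bed_from_cigar alignstart is_reverse cigartuples readname referencename qualscore juncDirection (bed_from_cigar alignstart is_reverse cigartuples readname referencename qualscore juncDirection)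

-- ===== LEMMAS AND PROOFS =====

-- invariant: B's fused state mirrors A's (refpos, intronblocks, hasmatch) with the
-- exon lists already computed from intronblocks
lemma pv_fold_equiv (a : Int) (l : List (Int × Int)) (r : Int) (h : Bool) (ib : List (Int × Int)) :
    l.foldl (pvStepB a)
      (r, h, (ib.length : Int), (ib.foldl (pvExonStep a) ([], [0])).1, (ib.foldl (pvExonStep a) ([], [0])).2)
    = ((l.foldl pvStepA (r, ib, h)).1,
       (l.foldl pvStepA (r, ib, h)).2.2,
       ((l.foldl pvStepA (r, ib, h)).2.1.length : Int),
       ((l.foldl pvStepA (r, ib, h)).2.1.foldl (pvExonStep a) ([], [0])).1,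
       ((l.foldl pvStepA (r, ib, h)).2.1.foldl (pvExonStep a) ([], [0])).2) := by
  induction l generalizing r h ib with
  | nil => simp
  | cons b t ih =>
    by_cases h3 : b.1 == 3 && h
    · have hA : pvStepA (r, ib, h) b = (r + b.2, ib ++ [(r, r + b.2)], h) := by
        simp [pvStepA, h3]
      have hB : pvStepB a (r, h, (ib.length : Int), (ib.foldl (pvExonStep a) ([], [0])).1, (ib.foldl (pvExonStep a) ([], [0])).2) b
          = (r + b.2, h, (ib.length : Int) + 1,
             ((ib ++ [(r, r + b.2)]).foldl (pvExonStep a) ([], [0])).1,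
             ((ib ++ [(r, r + b.2)]).foldl (pvExonStep a) ([], [0])).2) := by
        simp [pvStepB, h3, List.foldl_append, pvExonStep]
      simp only [List.foldl_cons, hA, hB]
      have := ih (r + b.2) h (ib ++ [(r, r + b.2)])
      simpa using this
    · by_cases hm : b.1 == 0 || b.1 == 7 || b.1 == 8 || b.1 == 2
      · have hcond : (if (b.1 == 0 || b.1 == 7 || b.1 == 8) = true then true else h)
            = (if (b.1 != 2) = true then true else h) := by
          by_cases h2 : b.1 = 2
          · simp [h2]
          · have e1 : (b.1 == 0 || b.1 == 7 || b.1 == 8) = true := by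
              simp only [Bool.or_eq_true, beq_iff_eq] at hm ⊢
              tauto
            simp [e1, h2]
        have hA : pvStepA (r, ib, h) b = (r + b.2, ib, if (b.1 != 2) = true then true else h) := by
          simp only [pvStepA]
          rw [if_neg (by exact h3), if_pos hm, hcond]
        have hB : pvStepB a (r, h, (ib.length : Int), (ib.foldl (pvExonStep a) ([], [0])).1, (ib.foldl (pvExonStep a) ([], [0])).2) b
            = (r + b.2, (if (b.1 != 2) = true then true else h), (ib.length : Int),
               (ib.foldl (pvExonStep a) ([], [0])).1, (ib.foldl (pvExonStep a) ([], [0])).2) := by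
          simp only [pvStepB]
          rw [if_neg (by exact h3), if_pos hm]
        simp only [List.foldl_cons, hA, hB]
        exact ih (r + b.2) (if (b.1 != 2) = true then true else h) ib
      · have hA : pvStepA (r, ib, h) b = (r, ib, h) := by
          simp only [pvStepA]
          rw [if_neg (by exact h3), if_neg (by exact hm)]
        have hB : pvStepB a (r, h, (ib.length : Int), (ib.foldl (pvExonStep a) ([], [0])).1, (ib.foldl (pvExonStep a) ([], [0])).2) b
            = (r, h, (ib.length : Int), (ib.foldl (pvExonStep a) ([], [0])).1, (ib.foldl (pvExonStep a) ([], [0])).2) := by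
          simp only [pvStepB]
          rw [if_neg (by exact h3), if_neg (by exact hm)]
        simp only [List.foldl_cons, hA, hB]
        exact ih r h ib

lemma pv_rgb (j : String) :
    (((PySem.Dict.empty.insert "+" "27,158,119").insert "-" "217,95,2").insert "ambig" "99,99,99").getD j "99,99,99"
    = (if j == "+" then "27,158,119" else if j == "-" then "217,95,2" else "99,99,99") := by
  by_cases h1 : j = "+"
  · subst h1; decide
  · by_cases h2 : j = "-"
    · subst h2; decide
    · by_cases h3 : j = "ambig"
      · subst h3; decide
      · rw [PySem.Dict.getD_insert, PySem.Dict.getD_insert, PySem.Dict.getD_insert]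
        simp [PySem.Dict.getD_empty, h1, h2, h3]

-- ===== VERDICT (by name: the statement is the Claim_ definition above) =====
theorem bed_from_cigar_spec : Claim_equal_bed_from_cigar := by
  intro alignstart is_reverse cigartuples readname referencename qualscore juncDirection _
  unfold Spec_bed_from_cigar bed_from_cigar bed_from_cigar_alt
  have h := pv_fold_equiv alignstart cigartuples alignstart false []
  simp only [List.length_nil, Int.natCast_zero, List.foldl_nil] at h
  rw [h, pv_rgb]
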